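-- pv_equiv track=rewrite | github.com/roybens/NeuroGPU | Figures/Figure4_DEAP/extractModel.py | get_bool_model
-- ===== SOURCE A (Python) =====
-- def get_bool_model(available_mechs, NX, comp_mechs, comp_map, seg_start, seg_end):#TODO this shoud be reduced to ncomp instead of nx and use the map comp_map in CUDA
--     bool_model = []
--     for mech_name in available_mechs:
--         curr_bool_list = [0] * NX
--         for ind in range(len(seg_start)):
--             comp = comp_map[ind]
--             curr_bool = 1 * (index_containing_substring(comp_mechs[ind], mech_name) > -1)
--
--             for i in range(seg_start[comp], seg_end[comp]):
--                 curr_bool_list[i] = curr_bool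
--         curr_bool_list[0] = 0
--         bool_model.append(curr_bool_list)
--     return bool_model
--
-- def index_containing_substring(the_list, substring):
--     for i, s in enumerate(the_list):
--         if substring in s:
--             return i
--     return -1
-- ===== SOURCE B (Python) =====
-- def get_bool_model(available_mechs, NX, comp_mechs, comp_map, seg_start, seg_end):
--     if not available_mechs:
--         return []
--     n = len(seg_start)
--     # pass 1: owner array -- for each cell, the LAST segment whose range wrote it
--     # (same write order as the fills, so last-write-wins is preserved), -1 = never written
--     owner = [-1] * NX
--     for ind in range(n):
--         c = comp_map[ind]
--         for i in range(seg_start[c], seg_end[c]):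
--             owner[i] = ind
--     # pass 2: per-segment set of the mechanism names occurring in its string list
--     pres = [set(m for m in available_mechs if any(m in s for s in mechs))
--             for mechs in comp_mechs[:n]]
--     # pass 3: build every row positionally from owner (index 0 is always 0)
--     return [[0] + [1 if owner[p] >= 0 and m in pres[owner[p]] else 0
--                    for p in range(1, NX)]
--             for m in available_mechs]
-- ===== Notes on version B (the rewrite author's own statement) =====
-- stated objective: alternative
-- what changed: B replaces A's per-mechanism range-filling loops with an owner array: one pass over the segments records, per cell, the last segment that wrote it; each boolean row is then built positionally from that array and a per-segment presence table, so the M-fold repetition of the fill loops and the per-(mechanism,segment) substring rescans disappear.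
import Mathlib
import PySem

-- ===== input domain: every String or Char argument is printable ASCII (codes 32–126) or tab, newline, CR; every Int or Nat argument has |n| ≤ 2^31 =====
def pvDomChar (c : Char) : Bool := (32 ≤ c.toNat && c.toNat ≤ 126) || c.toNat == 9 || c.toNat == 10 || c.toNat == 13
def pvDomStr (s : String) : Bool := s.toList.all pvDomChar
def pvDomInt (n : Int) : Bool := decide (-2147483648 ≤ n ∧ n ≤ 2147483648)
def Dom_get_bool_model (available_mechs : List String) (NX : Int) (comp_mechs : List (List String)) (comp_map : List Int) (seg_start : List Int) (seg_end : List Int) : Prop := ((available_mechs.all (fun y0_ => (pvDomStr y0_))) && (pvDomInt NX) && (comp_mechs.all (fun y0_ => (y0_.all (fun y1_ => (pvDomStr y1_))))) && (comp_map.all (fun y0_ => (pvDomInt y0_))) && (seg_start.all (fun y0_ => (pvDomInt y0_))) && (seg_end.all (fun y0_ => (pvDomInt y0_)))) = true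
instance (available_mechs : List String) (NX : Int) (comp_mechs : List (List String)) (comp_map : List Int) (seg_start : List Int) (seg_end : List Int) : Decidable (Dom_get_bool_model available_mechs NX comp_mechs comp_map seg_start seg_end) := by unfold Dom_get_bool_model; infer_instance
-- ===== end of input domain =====

-- B replaces A's per-mechanism range fills by one owner-array pass over the segments plus a
-- positional construction of every row from that array (objective: alternative decomposition).

-- ===== PORT A =====
def icsAux (substring : String) : List (Int × String) → Int
  | [] => -1
  | (i, s) :: rest => if PySem.Str.isIn substring s then i else icsAux substring rest

def index_containing_substring (the_list : List String) (substring : String) : Int :=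
  icsAux substring (PySem.List.enumerate the_list 0)

-- the body of A's outer loop: build curr_bool_list for one mech_name
def fillRowA (mech_name : String) (NX : Int) (comp_mechs : List (List String)) (comp_map : List Int) (seg_start : List Int) (seg_end : List Int) : List Int :=
  (PySem.List.pyRange 0 (seg_start.length : Int) 1).foldl (fun curr_bool_list ind =>
    let comp := PySem.List.pyGetD comp_map ind 0
    let curr_bool : Int :=
      if index_containing_substring (PySem.List.pyGetD comp_mechs ind []) mech_name > -1 then 1 else 0
    (PySem.List.pyRange (PySem.List.pyGetD seg_start comp 0) (PySem.List.pyGetD seg_end comp 0) 1).foldl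
      (fun l i => PySem.List.pySetD l i curr_bool) curr_bool_list)
    (PySem.List.pyRepeat [(0 : Int)] NX)

def get_bool_model (available_mechs : List String) (NX : Int) (comp_mechs : List (List String)) (comp_map : List Int) (seg_start : List Int) (seg_end : List Int) : List (List Int) :=
  available_mechs.foldl (fun bool_model mech_name =>
    bool_model ++ [PySem.List.pySetD (fillRowA mech_name NX comp_mechs comp_map seg_start seg_end) 0 0]) []

-- ===== PORT B =====
-- pass 1: owner array — for each cell, the last segment index whose range wrote it (-1 = none)
def ownerTable (NX : Int) (comp_map : List Int) (seg_start : List Int) (seg_end : List Int) : List Int :=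
  (PySem.List.pyRange 0 (seg_start.length : Int) 1).foldl (fun owner ind =>
    let c := PySem.List.pyGetD comp_map ind 0
    (PySem.List.pyRange (PySem.List.pyGetD seg_start c 0) (PySem.List.pyGetD seg_end c 0) 1).foldl
      (fun l i => PySem.List.pySetD l i ind) owner)
    (PySem.List.pyRepeat [(-1 : Int)] NX)

-- pass 2: per-segment set of the available mechs occurring in that segment's string list
def presTable (available_mechs : List String) (comp_mechs : List (List String)) (n : Nat) : List (PySem.Set String) :=
  (comp_mechs.take n).map (fun mechs =>
    PySem.Set.ofList (available_mechs.filter (fun m => mechs.any (fun s => PySem.Str.isIn m s))))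

def get_bool_model_alt (available_mechs : List String) (NX : Int) (comp_mechs : List (List String)) (comp_map : List Int) (seg_start : List Int) (seg_end : List Int) : List (List Int) :=
  if available_mechs = [] then [] else
  let n := seg_start.length
  let owner := ownerTable NX comp_map seg_start seg_end
  let pres := presTable available_mechs comp_mechs n
  available_mechs.map (fun m =>
    [(0 : Int)] ++ (PySem.List.pyRange 1 NX 1).map (fun p =>
      if 0 ≤ PySem.List.pyGetD owner p (-1) ∧
         PySem.Set.contains (PySem.List.pyGetD pres (PySem.List.pyGetD owner p (-1)) PySem.Set.empty) m = true
      then 1 else 0))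

-- ===== PRECONDITION & SPEC =====
-- Pre_ excludes exactly the inputs on which A raises an IndexError: when available_mechs is
-- nonempty, comp_mechs/comp_map must be long enough, comp_map[ind] must be a valid Python
-- index into seg_start and seg_end, every written position must be a valid index into the
-- row, and NX ≥ 1 so that curr_bool_list[0] = 0 succeeds.
def Pre_get_bool_model (available_mechs : List String) (NX : Int) (comp_mechs : List (List String)) (comp_map : List Int) (seg_start : List Int) (seg_end : List Int) : Prop :=
  available_mechs = [] ∨
  (1 ≤ NX ∧ seg_start.length ≤ comp_mechs.length ∧ seg_start.length ≤ comp_map.length ∧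
   ∀ ind ∈ List.range seg_start.length,
     PySem.Raise.InRange seg_start.length (PySem.List.pyGetD comp_map (ind : Int) 0) ∧
     PySem.Raise.InRange seg_end.length (PySem.List.pyGetD comp_map (ind : Int) 0) ∧
     (PySem.List.pyGetD seg_start (PySem.List.pyGetD comp_map (ind : Int) 0) 0 <
        PySem.List.pyGetD seg_end (PySem.List.pyGetD comp_map (ind : Int) 0) 0 →
      -NX ≤ PySem.List.pyGetD seg_start (PySem.List.pyGetD comp_map (ind : Int) 0) 0 ∧
      PySem.List.pyGetD seg_end (PySem.List.pyGetD comp_map (ind : Int) 0) 0 ≤ NX))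
instance (available_mechs : List String) (NX : Int) (comp_mechs : List (List String)) (comp_map : List Int) (seg_start : List Int) (seg_end : List Int) : Decidable (Pre_get_bool_model available_mechs NX comp_mechs comp_map seg_start seg_end) := by unfold Pre_get_bool_model; infer_instance

def pvWitness_get_bool_model : List String × Int × List (List String) × List Int × List Int × List Int :=
  (["na"], 3, [["na_soma"]], [0], [1], [3])

def Spec_get_bool_model (available_mechs : List String) (NX : Int) (comp_mechs : List (List String)) (comp_map : List Int) (seg_start : List Int) (seg_end : List Int) (out : List (List Int)) : Prop := out = get_bool_model_alt available_mechs NX comp_mechs comp_map seg_start seg_end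
instance (available_mechs : List String) (NX : Int) (comp_mechs : List (List String)) (comp_map : List Int) (seg_start : List Int) (seg_end : List Int) (out : List (List Int)) : Decidable (Spec_get_bool_model available_mechs NX comp_mechs comp_map seg_start seg_end out) := by unfold Spec_get_bool_model; infer_instance

-- ===== CLAIM (what is proved, stated in full; the proofs are below) =====
def Claim_equal_get_bool_model : Prop := ∀ (available_mechs : List String) (NX : Int) (comp_mechs : List (List String)) (comp_map : List Int) (seg_start : List Int) (seg_end : List Int), Dom_get_bool_model available_mechs NX comp_mechs comp_map seg_start seg_end → Pre_get_bool_model available_mechs NX comp_mechs comp_map seg_start seg_end → Spec_get_bool_model available_mechs NX comp_mechs comp_map seg_start seg_end (get_bool_model available_mechs NX comp_mechs comp_map seg_start seg_end)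

-- ===== LEMMAS AND PROOFS =====

-- the mechanism-presence value A's scan computes, as a function of an owner entry
def ownerVal (comp_mechs : List (List String)) (m : String) (o : Int) : Int :=
  if 0 ≤ o ∧ (PySem.List.pyGetD comp_mechs o []).any (fun s => PySem.Str.isIn m s) = true then 1 else 0

-- scanning from a nonnegative start index succeeds (> -1) iff some element contains the substring
theorem icsAux_pos_iff (m : String) (L : List String) (s : Int) (hs : 0 ≤ s) :
    (icsAux m (PySem.List.enumerate L s) > -1) ↔ L.any (fun x => PySem.Str.isIn m x) = true := by
  induction L generalizing s with
  | nil => simp [PySem.List.enumerate, icsAux]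
  | cons x xs ih =>
    by_cases h : PySem.Chars.isIn m.toList x.toList = true
    · simp [PySem.List.enumerate, icsAux, h]
      omega
    · simp only [PySem.List.enumerate, icsAux, PySem.Str.isIn_eq, if_neg h, List.any_cons]
      rw [ih (s + 1) (by omega)]
      simp [PySem.Str.isIn_eq, h]

theorem ics_pos_iff (m : String) (L : List String) :
    (index_containing_substring L m > -1) ↔ L.any (fun x => PySem.Str.isIn m x) = true :=
  icsAux_pos_iff m L 0 (by omega)

-- pySetD writes by position only, so it commutes with map
theorem map_pySetD {α β : Type} (g : α → β) (xs : List α) (i : Int) (v : α) :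
    (PySem.List.pySetD xs i v).map g = PySem.List.pySetD (xs.map g) i (g v) := by
  simp only [PySem.List.pySetD, PySem.List.pySet?, List.length_map]
  cases h : PySem.List.pyIdx? xs.length i <;> simp [List.map_set]

theorem mem_pySetD {α : Type} {x v : α} {xs : List α} {i : Int}
    (h : x ∈ PySem.List.pySetD xs i v) : x = v ∨ x ∈ xs := by
  simp only [PySem.List.pySetD, PySem.List.pySet?] at h
  cases hi : PySem.List.pyIdx? xs.length i with
  | none => simp [hi] at h; exact Or.inr h
  | some k =>
    simp [hi] at h
    rcases List.mem_or_eq_of_mem_set h with h' | h'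
    · exact Or.inr h'
    · exact Or.inl h'

-- a run of writes of a constant value commutes with map when the values correspond
theorem foldl_set_map (g : Int → Int) (R : List Int) (vO vA : Int) (hv : g vO = vA) (acc : List Int) :
    R.foldl (fun l i => PySem.List.pySetD l i vA) (acc.map g)
      = (R.foldl (fun l i => PySem.List.pySetD l i vO) acc).map g := by
  induction R generalizing acc with
  | nil => rfl
  | cons r rs ih =>
    simp only [List.foldl_cons]
    rw [show PySem.List.pySetD (acc.map g) r vA = (PySem.List.pySetD acc r vO).map g from by
      rw [map_pySetD, hv]]
    exact ih _

-- A's row for mech m is the owner table mapped through ownerVal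
theorem fillRowA_eq_map (m : String) (NX : Int) (comp_mechs : List (List String))
    (comp_map : List Int) (seg_start : List Int) (seg_end : List Int) :
    fillRowA m NX comp_mechs comp_map seg_start seg_end
      = (ownerTable NX comp_map seg_start seg_end).map (ownerVal comp_mechs m) := by
  unfold fillRowA ownerTable
  have hinit : PySem.List.pyRepeat [(0 : Int)] NX
      = (PySem.List.pyRepeat [(-1 : Int)] NX).map (ownerVal comp_mechs m) := by
    simp [PySem.List.pyRepeat_singleton, List.map_replicate, ownerVal]
  rw [hinit]
  generalize hL : PySem.List.pyRange 0 (seg_start.length : Int) 1 = L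
  have hLmem : ∀ x ∈ L, (0 : Int) ≤ x := by
    intro x hx; rw [← hL, PySem.List.mem_pyRange_one] at hx; exact hx.1
  clear hL
  generalize PySem.List.pyRepeat [(-1 : Int)] NX = acc
  induction L generalizing acc with
  | nil => rfl
  | cons ind rest ih =>
    simp only [List.foldl_cons]
    rw [foldl_set_map (ownerVal comp_mechs m) _ ind _ ?_ acc]
    · exact ih (fun x hx => hLmem x (List.mem_cons_of_mem _ hx)) _
    · have hind : (0 : Int) ≤ ind := hLmem ind (List.mem_cons_self ..)
      unfold ownerVal
      by_cases h : (PySem.List.pyGetD comp_mechs ind []).any (fun s => PySem.Str.isIn m s) = true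
      · rw [if_pos ⟨hind, h⟩, if_pos ((ics_pos_iff m _).2 h)]
      · rw [if_neg (fun hc => h hc.2), if_neg ((ics_pos_iff m _).not.2 h)]

-- every owner entry is -1 or a valid segment index
theorem ownerTable_entries (NX : Int) (comp_map : List Int) (seg_start : List Int) (seg_end : List Int) :
    ∀ x ∈ ownerTable NX comp_map seg_start seg_end,
      x = -1 ∨ (0 ≤ x ∧ x < (seg_start.length : Int)) := by
  unfold ownerTable
  generalize hL : PySem.List.pyRange 0 (seg_start.length : Int) 1 = L
  have hLmem : ∀ x ∈ L, (0 : Int) ≤ x ∧ x < (seg_start.length : Int) := by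
    intro x hx; rw [← hL, PySem.List.mem_pyRange_one] at hx; exact hx
  clear hL
  have hinit : ∀ x ∈ PySem.List.pyRepeat [(-1 : Int)] NX,
      x = -1 ∨ (0 ≤ x ∧ x < (seg_start.length : Int)) := by
    intro x hx
    rw [PySem.List.pyRepeat_singleton, List.mem_replicate] at hx
    exact Or.inl hx.2
  generalize hacc0 : PySem.List.pyRepeat [(-1 : Int)] NX = acc
  rw [hacc0] at hinit
  clear hacc0
  induction L generalizing acc with
  | nil => exact hinit
  | cons ind rest ih =>
    simp only [List.foldl_cons]
    apply ih (fun x hx => hLmem x (List.mem_cons_of_mem _ hx))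
    have hbody : ∀ (R : List Int) (a : List Int),
        (∀ x ∈ a, x = -1 ∨ (0 ≤ x ∧ x < (seg_start.length : Int))) →
        ∀ x ∈ R.foldl (fun l i => PySem.List.pySetD l i ind) a,
          x = -1 ∨ (0 ≤ x ∧ x < (seg_start.length : Int)) := by
      intro R
      induction R with
      | nil => intro a ha; exact ha
      | cons r rs ihr =>
        intro a ha
        simp only [List.foldl_cons]
        apply ihr
        intro x hx
        rcases mem_pySetD hx with h | h
        · exact Or.inr (h ▸ hLmem ind (List.mem_cons_self ..))
        · exact ha x h
    exact hbody _ _ hinit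

-- reading the presence table at a valid index answers the question A's scan answers
theorem presence_lookup (available_mechs : List String) (comp_mechs : List (List String))
    (n : Nat) (ind : Int) (mech : String) (hmem : mech ∈ available_mechs)
    (h0 : 0 ≤ ind) (hn : ind < (n : Int)) :
    PySem.Set.contains (PySem.List.pyGetD (presTable available_mechs comp_mechs n) ind PySem.Set.empty) mech
    = (PySem.List.pyGetD comp_mechs ind []).any (fun s => PySem.Str.isIn mech s) := by
  have hnat : ind = ((ind.toNat : Nat) : Int) := by omega
  rw [hnat, PySem.List.pyGetD_natCast, PySem.List.pyGetD_natCast]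
  unfold presTable
  by_cases hlen : ind.toNat < comp_mechs.length
  · have htake : ind.toNat < ((comp_mechs.take n).map (fun mechs =>
        PySem.Set.ofList (available_mechs.filter (fun m => mechs.any (fun s => PySem.Str.isIn m s))))).length := by
      simp [List.length_take]; omega
    rw [List.getD_eq_getElem _ _ htake, List.getD_eq_getElem _ _ hlen]
    have hidx : ind.toNat < n := by omega
    simp only [List.getElem_map, List.getElem_take]
    rcases h : (comp_mechs[ind.toNat].any (fun s => PySem.Str.isIn mech s)) with _ | _
    · rw [← Bool.not_eq_true, PySem.Set.contains_iff, PySem.Set.mem_ofList]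
      intro hc
      exact absurd (List.mem_filter.1 hc).2 (by simp only [h]; simp)
    · rw [PySem.Set.contains_iff, PySem.Set.mem_ofList]
      exact List.mem_filter.2 ⟨hmem, h⟩
  · have h1 : ((comp_mechs.take n).map (fun mechs =>
        PySem.Set.ofList (available_mechs.filter (fun m => mechs.any (fun s => PySem.Str.isIn m s))))).length ≤ ind.toNat := by
      simp [List.length_take]; omega
    rw [List.getD_eq_default _ _ h1, List.getD_eq_default _ _ (by omega)]
    simp [PySem.Set.empty, PySem.Set.contains]

-- seg_start.length writes of pySetD keep the length
theorem length_ownerTable (NX : Int) (comp_map : List Int) (seg_start : List Int) (seg_end : List Int) :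
    (ownerTable NX comp_map seg_start seg_end).length = NX.toNat := by
  unfold ownerTable
  generalize PySem.List.pyRange 0 (seg_start.length : Int) 1 = L
  have hinit : (PySem.List.pyRepeat [(-1 : Int)] NX).length = NX.toNat := by
    simp [PySem.List.pyRepeat_singleton]
  generalize hacc0 : PySem.List.pyRepeat [(-1 : Int)] NX = acc
  rw [hacc0] at hinit
  clear hacc0
  induction L generalizing acc with
  | nil => exact hinit
  | cons ind rest ih =>
    simp only [List.foldl_cons]
    apply ih
    have hbody : ∀ (R : List Int) (a : List Int), a.length = NX.toNat →
        (R.foldl (fun l i => PySem.List.pySetD l i ind) a).length = NX.toNat := by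
      intro R
      induction R with
      | nil => intro a ha; exact ha
      | cons r rs ihr =>
        intro a ha
        simp only [List.foldl_cons]
        exact ihr _ (by rw [PySem.List.length_pySetD]; exact ha)
    exact hbody _ _ hinit

-- assembling one output row: setting index 0 of the mapped owner table is the positional build
theorem row_assemble (owner : List Int) (NX : Int) (f f2 : Int → Int)
    (h1 : 1 ≤ NX) (hlen : owner.length = NX.toNat)
    (hf : ∀ x ∈ owner, f x = f2 x) :
    PySem.List.pySetD (owner.map f) (0 : Int) 0
      = [0] ++ (PySem.List.pyRange 1 NX 1).map (fun p => f2 (PySem.List.pyGetD owner p (-1))) := by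
  rw [PySem.List.pySetD_of_nonneg _ _ (by omega : (0:Int) ≤ 0)]
  apply List.ext_getElem
  · simp [PySem.List.length_pyRange_one, hlen]; omega
  · intro k hk1 hk2
    have hk : k < NX.toNat := by
      simpa [hlen] using hk1
    rcases Nat.eq_zero_or_pos k with hk0 | hkpos
    · subst hk0
      simp
    · obtain ⟨j, rfl⟩ : ∃ j, k = j + 1 := ⟨k - 1, by omega⟩
      have hjlt : j + 1 < owner.length := by omega
      have hL : (((owner.map f).set (Int.toNat 0) 0)[j+1]'hk1) = f (owner[j+1]'hjlt) := by
        rw [List.getElem_set]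
        simp
      rw [hL]
      have hgetr : ([(0:Int)] ++ (PySem.List.pyRange 1 NX 1).map
          (fun p => f2 (PySem.List.pyGetD owner p (-1))))[j+1]'hk2
          = ((PySem.List.pyRange 1 NX 1).map (fun p => f2 (PySem.List.pyGetD owner p (-1))))[j]'(by
              simp [PySem.List.length_pyRange_one]; omega) := by
        rw [List.getElem_append_right (by simp)]
        simp
      rw [hgetr, List.getElem_map, PySem.List.getElem_pyRange_one]
      have hcast : (1 : Int) + (j : Int) = (((j + 1 : Nat)) : Int) := by push_cast; ring
      rw [hcast, PySem.List.pyGetD_natCast, List.getD_eq_getElem _ _ hjlt]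
      exact hf _ (List.getElem_mem hjlt)

-- ===== VERDICT (by name: the statement is the Claim_ definition above) =====
theorem get_bool_model_spec : Claim_equal_get_bool_model := by
  intro available_mechs NX comp_mechs comp_map seg_start seg_end _ hpre
  unfold Spec_get_bool_model get_bool_model get_bool_model_alt
  rcases eq_or_ne available_mechs [] with rfl | hne
  · simp
  · rw [if_neg hne, PySem.List.foldl_append_singleton_eq_map]
    apply List.map_congr_left
    intro m hm
    have hNX : 1 ≤ NX := by
      rcases hpre with h | h
      · exact absurd h hne
      · exact h.1
    rw [fillRowA_eq_map]
    apply row_assemble (ownerTable NX comp_map seg_start seg_end) NX (ownerVal comp_mechs m)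
      (fun o => if 0 ≤ o ∧
         PySem.Set.contains (PySem.List.pyGetD (presTable available_mechs comp_mechs seg_start.length) o PySem.Set.empty) m = true
       then 1 else 0) hNX (length_ownerTable ..)
    intro x hx
    rcases ownerTable_entries NX comp_map seg_start seg_end x hx with hx1 | hx2
    · subst hx1; simp [ownerVal]
    · unfold ownerVal
      rw [presence_lookup available_mechs comp_mechs seg_start.length x m hm hx2.1 hx2.2]
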